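-- pv_equiv track=rewrite | github.com/saparina/ambrosia | src/evaluation/metrics.py | duplicate_exact
-- ===== SOURCE A (Python) =====
-- def duplicate_exact(results):
--     # Convert each result set into a tuple of tuples to make them hashable
--     hashable_results = [tuple(map(tuple, result)) for result in results]
--
--     # Use a set to identify duplicates
--     seen = set()
--     for idx, result in enumerate(hashable_results):
--         if result in seen:
--             return True, result, idx + 1
--         seen.add(result)
--     return False, None, None
-- ===== SOURCE B (Python) =====
-- def duplicate_exact(results):
--     # Grouping algorithm: collect all positions of each normalised result,
--     # then the answer is the minimum second-occurrence position over all groups.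
--     hashable_results = [tuple(map(tuple, result)) for result in results]
--     positions = {}
--     for idx, result in enumerate(hashable_results):
--         positions.setdefault(result, []).append(idx)
--     seconds = [(ps[1], r) for r, ps in positions.items() if len(ps) > 1]
--     if not seconds:
--         return False, None, None
--     j, r = min(seconds, key=lambda t: t[0])
--     return True, r, j + 1
-- ===== Notes on version B (the rewrite author's own statement) =====
-- stated objective: alternative
-- what changed: Replaces A's early-exit scan with a growing seen-set by a grouping algorithm: one pass groups all positions of each normalised result in a dict, then the answer is the minimum second-occurrence position over all groups (no early return, no membership test against accumulated state).
import Mathlib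
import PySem

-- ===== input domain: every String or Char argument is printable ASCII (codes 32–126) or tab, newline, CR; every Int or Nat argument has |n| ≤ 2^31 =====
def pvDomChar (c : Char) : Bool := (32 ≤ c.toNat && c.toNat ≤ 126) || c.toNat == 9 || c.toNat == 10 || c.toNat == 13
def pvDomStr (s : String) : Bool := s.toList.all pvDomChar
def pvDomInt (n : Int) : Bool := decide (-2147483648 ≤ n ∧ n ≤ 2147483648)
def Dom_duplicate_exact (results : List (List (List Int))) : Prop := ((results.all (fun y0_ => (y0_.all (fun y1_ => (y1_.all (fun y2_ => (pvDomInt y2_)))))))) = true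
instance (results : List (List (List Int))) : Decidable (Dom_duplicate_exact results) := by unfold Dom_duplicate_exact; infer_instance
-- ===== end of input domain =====

-- B replaces A's early-exit scan over a growing 'seen' set by a grouping algorithm: one pass groups
-- all positions of each normalised result in a dict, then the answer is the minimum second-occurrence
-- position over all groups (alternative decomposition, same results).

-- ===== PORT A =====
-- the 'for idx, result in enumerate(...)' loop with the accumulated 'seen' set
def duplicate_exact_go (rest : List (List (List Int))) (idx : Int) (seen : PySem.Set (List (List Int))) :
    Bool × Option (List (List Int)) × Option Int :=
  match rest with
  | [] => (false, none, none)
  | r :: rs =>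
      if PySem.Set.contains seen r then (true, some r, some (idx + 1))
      else duplicate_exact_go rs (idx + 1) (PySem.Set.add seen r)

def duplicate_exact (results : List (List (List Int))) : Bool × Option (List (List Int)) × Option Int :=
  let hashable := results.map (fun result => result.map (fun row => row))
  duplicate_exact_go hashable 0 PySem.Set.empty

-- ===== PORT B =====
def duplicate_exact_alt (results : List (List (List Int))) : Bool × Option (List (List Int)) × Option Int :=
  let hashable := results.map (fun result => result.map (fun row => row))
  -- positions.setdefault(result, []).append(idx)
  let positions : PySem.Dict (List (List Int)) (List Int) :=
    (PySem.List.enumerate hashable 0).foldl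
      (fun d p => d.modify p.2 [] (fun ps => ps ++ [p.1])) PySem.Dict.empty
  -- [(ps[1], r) for r, ps in positions.items() if len(ps) > 1]; the guard puts index 1 in range, so pyGetD is exact for ps[1]
  let seconds : List (Int × List (List Int)) :=
    (positions.items.filter (fun p => decide (1 < p.2.length))).map
      (fun p => (PySem.List.pyGetD p.2 1 0, p.1))
  match PySem.List.min? seconds (fun t => t.1) with
  | none => (false, none, none)
  | some (j, r) => (true, some r, some (j + 1))

-- ===== PRECONDITION & SPEC =====
def Spec_duplicate_exact (results : List (List (List Int))) (out : Bool × Option (List (List Int)) × Option Int) : Prop := out = duplicate_exact_alt results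
instance (results : List (List (List Int))) (out : Bool × Option (List (List Int)) × Option Int) : Decidable (Spec_duplicate_exact results out) := by unfold Spec_duplicate_exact; infer_instance

-- ===== CLAIM (what is proved, stated in full; the proofs are below) =====
def Claim_equal_duplicate_exact : Prop := ∀ (results : List (List (List Int))), Dom_duplicate_exact results → Spec_duplicate_exact results (duplicate_exact results)

-- ===== LEMMAS AND PROOFS =====

-- abstract first-duplicate scan (A's semantics): index and value of the first element already seen
def pvFd (pfx rest : List (List (List Int))) : Option (Int × List (List Int)) :=
  match rest with
  | [] => none
  | r :: rs => if r ∈ pfx then some ((pfx.length : Int), r) else pvFd (pfx ++ [r]) rs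
def pvRender (o : Option (Int × List (List Int))) : Bool × Option (List (List Int)) × Option Int :=
  match o with
  | none => (false, none, none)
  | some (i, r) => (true, some r, some (i + 1))
def pvOcc (h : List (List (List Int))) (r : List (List Int)) : List Int :=
  ((PySem.List.enumerate h 0).filter (fun p => p.2 == r)).map (fun p => p.1)
def pvSeconds (h : List (List (List Int))) : List (Int × List (List Int)) :=
  ((PySem.Set.ofList h).filter (fun r => decide (1 < (pvOcc h r).length))).map
    (fun r => (PySem.List.pyGetD (pvOcc h r) 1 0, r))

theorem pvGo_eq_render_fd (rest : List (List (List Int))) :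
    ∀ pfx, duplicate_exact_go rest (pfx.length : Int) (PySem.Set.ofList pfx) = pvRender (pvFd pfx rest) := by
  induction rest with
  | nil => intro pfx; rfl
  | cons r rs ih =>
    intro pfx
    rw [duplicate_exact_go, pvFd]
    by_cases hr : r ∈ pfx
    · have h1 : PySem.Set.contains (PySem.Set.ofList pfx) r = true := by
        simp [PySem.Set.contains, PySem.Set.mem_ofList, hr]
      rw [h1, if_pos hr]; rfl
    · have h1 : PySem.Set.contains (PySem.Set.ofList pfx) r = false := by
        simp [PySem.Set.contains, PySem.Set.mem_ofList, hr]
      rw [h1, if_neg hr]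
      simp only [Bool.false_eq_true, if_false]
      have hadd : PySem.Set.add (PySem.Set.ofList pfx) r = PySem.Set.ofList (pfx ++ [r]) := by
        simp [PySem.Set.ofList_eq_foldl, List.foldl_append]
      have hlen : ((pfx.length : Int) + 1) = (((pfx ++ [r]).length : Nat) : Int) := by simp
      rw [hadd, hlen, ih (pfx ++ [r])]

theorem pvOcc_length (h : List (List (List Int))) (r : List (List Int)) :
    (pvOcc h r).length = h.count r := by
  rw [pvOcc, List.length_map, ← List.countP_eq_length_filter, List.count_eq_countP]
  have hc := (List.countP_map (p := fun x => x == r)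
    (f := fun p : Int × List (List Int) => p.2) (l := PySem.List.enumerate h 0)).symm
  rw [PySem.List.map_snd_enumerate] at hc
  exact hc

theorem pvOcc_append (h : List (List (List Int))) (x r : List (List Int)) :
    pvOcc (h ++ [x]) r = pvOcc h r ++ (if r = x then [(h.length : Int)] else []) := by
  rw [pvOcc, PySem.List.enumerate_append, List.filter_append, List.map_append, pvOcc]
  congr 1
  by_cases hrx : r = x
  · subst hrx; simp [PySem.List.enumerate]
  · simp [PySem.List.enumerate, Ne.symm hrx, hrx]

theorem pvMem_seconds_iff (h : List (List (List Int))) (q : Int × List (List Int)) :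
    q ∈ pvSeconds h ↔ q.2 ∈ h ∧ 1 < (pvOcc h q.2).length ∧ q.1 = PySem.List.pyGetD (pvOcc h q.2) 1 0 := by
  rw [pvSeconds]
  simp only [List.mem_map, List.mem_filter, PySem.Set.mem_ofList, decide_eq_true_eq]
  constructor
  · rintro ⟨r, ⟨hr, hlen⟩, rfl⟩; exact ⟨hr, hlen, rfl⟩
  · rintro ⟨hr, hlen, hq⟩
    exact ⟨q.2, ⟨hr, hlen⟩, by rw [← hq]⟩

theorem pvFd_append (x : List (List Int)) : ∀ (rest pfx : List (List (List Int))),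
    pvFd pfx (rest ++ [x]) =
      match pvFd pfx rest with
      | some p => some p
      | none => if x ∈ pfx ++ rest then some (((pfx ++ rest).length : Int), x) else none := by
  intro rest
  induction rest with
  | nil => intro pfx; simp [pvFd]
  | cons r rs ih =>
    intro pfx
    rw [List.cons_append, pvFd, pvFd]
    by_cases hr : r ∈ pfx
    · rw [if_pos hr, if_pos hr]
    · rw [if_neg hr, if_neg hr, ih (pfx ++ [r]), List.append_assoc, List.singleton_append]

theorem pvSeconds_eq_nil (h : List (List (List Int))) :
    pvSeconds h = [] ↔ ∀ r ∈ h, ¬ 1 < (pvOcc h r).length := by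
  rw [pvSeconds, List.map_eq_nil_iff, List.filter_eq_nil_iff]
  simp [PySem.Set.mem_ofList]

theorem pvGetD_one_append (l t : List Int) (hl : 1 < l.length) :
    PySem.List.pyGetD (l ++ t) 1 0 = PySem.List.pyGetD l 1 0 := by
  rw [PySem.List.pyGetD_ofNat', PySem.List.pyGetD_ofNat', List.getD_eq_getElem?_getD,
    List.getD_eq_getElem?_getD, List.getElem?_append_left hl]

theorem pvOfList_append_mem (h : List (List (List Int))) (x : List (List Int)) (hx : x ∈ h) :
    PySem.Set.ofList (h ++ [x]) = PySem.Set.ofList h := by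
  rw [PySem.Set.ofList_eq_foldl, List.foldl_append, ← PySem.Set.ofList_eq_foldl]
  simp only [List.foldl_cons, List.foldl_nil]
  simp [PySem.Set.add, PySem.Set.contains, PySem.Set.mem_ofList, hx]

theorem pvMain_inv (h : List (List (List Int))) :
    (pvFd [] h = none → pvSeconds h = []) ∧
    (∀ i x, pvFd [] h = some (i, x) →
      (i, x) ∈ pvSeconds h ∧ (∀ q ∈ pvSeconds h, q ≠ (i, x) → i < q.1) ∧ 0 ≤ i ∧ i < (h.length : Int)) := by
  induction h using List.reverseRecOn with
  | nil => exact ⟨fun _ => rfl, fun i x hx => by simp [pvFd] at hx⟩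
  | append_singleton h x ih =>
    obtain ⟨ihn, ihs⟩ := ih
    have hfd := pvFd_append x h []
    simp only [List.nil_append] at hfd
    constructor
    · intro hnone
      rcases hh : pvFd [] h with _ | p
      · rw [hh] at hfd
        by_cases hx : x ∈ h
        · rw [if_pos hx] at hfd; rw [hfd] at hnone; cases hnone
        · have hsn := (pvSeconds_eq_nil h).mp (ihn hh)
          rw [pvSeconds_eq_nil]
          intro r hr
          rcases List.mem_append.mp hr with hr' | hr'
          · have hocc : pvOcc (h ++ [x]) r = pvOcc h r := by
              rw [pvOcc_append, if_neg (by rintro rfl; exact hx hr'), List.append_nil]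
            rw [hocc]; exact hsn r hr'
          · simp only [List.mem_singleton] at hr'; subst hr'
            rw [pvOcc_append, if_pos rfl]
            have h0 : (pvOcc h r).length = 0 := by
              rw [pvOcc_length]; exact List.count_eq_zero.mpr hx
            simp [List.length_append, h0]
      · rw [hh] at hfd; rw [hfd] at hnone; cases hnone
    · intro i x0 hsome
      rcases hh : pvFd [] h with _ | ⟨i0, y0⟩
      · rw [hh] at hfd
        by_cases hx : x ∈ h
        · rw [if_pos hx] at hfd; rw [hfd] at hsome
          injection hsome with hpair
          rw [Prod.mk.injEq] at hpair
          obtain ⟨hi, hx0⟩ := hpair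
          subst hx0
          subst hi
          have hsn := (pvSeconds_eq_nil h).mp (ihn hh)
          have hc1 : (pvOcc h x).length = 1 := by
            have h1 := hsn x hx
            have h2 : 0 < h.count x := List.count_pos_iff.mpr hx
            rw [pvOcc_length] at h1 ⊢
            omega
          obtain ⟨a, ha⟩ := List.length_eq_one_iff.mp hc1
          have hsec : pvSeconds (h ++ [x]) = [((h.length : Int), x)] := by
            rw [pvSeconds, pvOfList_append_mem h x hx]
            have hfc : List.filter (fun r => decide (1 < (pvOcc (h ++ [x]) r).length)) (PySem.Set.ofList h)
                = List.filter (fun r => r == x) (PySem.Set.ofList h) := by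
              apply List.filter_congr
              intro r hr
              have hrh : r ∈ h := (PySem.Set.mem_ofList h r).mp hr
              by_cases hrx : r = x
              · subst hrx
                rw [pvOcc_append, if_pos rfl]
                simp [List.length_append, hc1]
              · rw [pvOcc_append, if_neg hrx, List.append_nil]
                simp [hsn r hrh, hrx]
            rw [hfc, List.filter_beq,
              List.count_eq_one_of_mem (PySem.Set.nodup_ofList h) ((PySem.Set.mem_ofList h x).mpr hx)]
            simp only [List.replicate_one, List.map_cons, List.map_nil]
            rw [pvOcc_append, if_pos rfl, ha]
            simp [PySem.List.pyGetD_ofNat']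
          refine ⟨by rw [hsec]; exact List.mem_singleton.mpr rfl, ?_, Int.natCast_nonneg _, ?_⟩
          · intro q hq hne
            rw [hsec] at hq
            simp only [List.mem_singleton] at hq
            exact absurd hq hne
          · simp only [List.length_append, List.length_singleton]
            push_cast; omega
        · rw [if_neg hx] at hfd; rw [hfd] at hsome; cases hsome
      · rw [hh] at hfd; rw [hfd] at hsome
        injection hsome with hpair
        rw [Prod.mk.injEq] at hpair
        obtain ⟨hi, hy⟩ := hpair
        subst hi; subst hy
        obtain ⟨hmem, hmin, hge, hlt⟩ := ihs i0 y0 hh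
        rw [pvMem_seconds_iff] at hmem
        obtain ⟨hm1, hm2, hm3⟩ := hmem
        replace hm1 : y0 ∈ h := hm1
        replace hm2 : 1 < (pvOcc h y0).length := hm2
        replace hm3 : i0 = PySem.List.pyGetD (pvOcc h y0) 1 0 := hm3
        refine ⟨?_, ?_, hge, ?_⟩
        · rw [pvMem_seconds_iff]
          refine ⟨List.mem_append_left _ hm1, ?_, ?_⟩
          · show 1 < (pvOcc (h ++ [x]) y0).length
            rw [pvOcc_append]
            simp only [List.length_append]
            omega
          · show i0 = PySem.List.pyGetD (pvOcc (h ++ [x]) y0) 1 0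
            rw [pvOcc_append, pvGetD_one_append _ _ hm2]
            exact hm3
        · intro q hq hne
          rw [pvMem_seconds_iff] at hq
          obtain ⟨hq1, hq2, hq3⟩ := hq
          by_cases hqx : q.2 = x
          · rw [hqx, pvOcc_append, if_pos rfl] at hq2 hq3
            by_cases hlen2 : 1 < (pvOcc h x).length
            · have hcount := pvOcc_length h x
              have hxh : x ∈ h := List.count_pos_iff.mp (by omega)
              clear hcount
              have hq' : q ∈ pvSeconds h := by
                rw [pvMem_seconds_iff, hqx]
                exact ⟨hxh, hlen2, by rw [hq3, pvGetD_one_append _ _ hlen2]⟩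
              exact hmin q hq' hne
            · have hl1 : (pvOcc h x).length = 1 := by
                simp only [List.length_append, List.length_singleton] at hq2
                omega
              obtain ⟨a, ha⟩ := List.length_eq_one_iff.mp hl1
              rw [ha] at hq3
              have hq1' : q.1 = (h.length : Int) := by
                rw [hq3]; simp [PySem.List.pyGetD_ofNat']
              rw [hq1']; exact hlt
          · have hocc : pvOcc (h ++ [x]) q.2 = pvOcc h q.2 := by
              rw [pvOcc_append, if_neg hqx, List.append_nil]
            rw [hocc] at hq2 hq3
            have hq1' : q.2 ∈ h := by
              rcases List.mem_append.mp hq1 with h' | h'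
              · exact h'
              · simp only [List.mem_singleton] at h'; exact absurd h' hqx
            exact hmin q ((pvMem_seconds_iff h q).mpr ⟨hq1', hq2, hq3⟩) hne
        · simp only [List.length_append, List.length_singleton]
          push_cast; omega

theorem pvMin_seconds_eq_fd (h : List (List (List Int))) :
    PySem.List.min? (pvSeconds h) (fun t => t.1) = pvFd [] h := by
  obtain ⟨hn, hs⟩ := pvMain_inv h
  rcases hh : pvFd [] h with _ | ⟨i, x⟩
  · rw [(PySem.List.min?_eq_none_iff _ _).mpr (hn hh)]
  · obtain ⟨hmem, hmin, _, _⟩ := hs i x hh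
    rcases hm : PySem.List.min? (pvSeconds h) (fun t => t.1) with _ | m
    · rw [PySem.List.min?_eq_none_iff] at hm
      rw [hm] at hmem
      cases hmem
    · have hmm := PySem.List.min?_mem hm
      have hle : m.1 ≤ i := PySem.List.min?_isMin hm (i, x) hmem
      by_cases hme : m = (i, x)
      · rw [hme]
      · exact absurd (hmin m hmm hme) (not_lt.mpr hle)

theorem pvSeconds_port (h : List (List (List Int))) :
    ((((PySem.List.enumerate h 0).foldl
        (fun d p => d.modify p.2 [] (fun ps => ps ++ [p.1])) PySem.Dict.empty).items.filter
        (fun p => decide (1 < p.2.length))).map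
      (fun p => (PySem.List.pyGetD p.2 1 0, p.1))) = pvSeconds h := by
  set E := PySem.List.enumerate h 0 with hE
  set d := E.foldl (fun d p => d.modify p.2 [] (fun ps => ps ++ [p.1])) PySem.Dict.empty with hd
  have hkeys : d.keys = PySem.Set.ofList h := by
    rw [hd, PySem.Dict.keys_foldl_modify_key E (fun p => p.2) [] (fun d p => fun ps => ps ++ [p.1]) PySem.Dict.empty, hE,
      PySem.List.map_snd_enumerate]
    rfl
  have hnodup : d.keys.Nodup := hkeys ▸ PySem.Set.nodup_ofList h
  have hgetD : ∀ r, d.getD r [] = pvOcc h r := by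
    intro r
    have hfold : d = (E.map (fun p => (p.2, p.1))).foldl
        (fun d q => d.modify q.1 [] (fun ps => ps ++ [q.2])) PySem.Dict.empty := by
      rw [hd, List.foldl_map]
    rw [hfold, PySem.Dict.getD_foldl_modify_append, List.filter_map, List.map_map,
      PySem.Dict.getD_empty, List.nil_append]
    rfl
  have hitems : d.items = (PySem.Set.ofList h).map (fun r => (r, pvOcc h r)) := by
    rw [PySem.Dict.items_eq_map_keys d hnodup [], hkeys]
    exact List.map_congr_left (fun r hr => by rw [hgetD r])
  rw [hitems, List.filter_map, List.map_map, pvSeconds]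
  rfl

-- ===== VERDICT (by name: the statement is the Claim_ definition above) =====
theorem duplicate_exact_spec : Claim_equal_duplicate_exact := by
  intro results _
  unfold Spec_duplicate_exact
  have hA : duplicate_exact results
      = pvRender (pvFd [] (results.map (fun result => result.map (fun row => row)))) := by
    have := pvGo_eq_render_fd (results.map (fun result => result.map (fun row => row))) []
    simp only [List.length_nil, Nat.cast_zero] at this
    exact this
  have hB : duplicate_exact_alt results
      = pvRender (PySem.List.min?
          (pvSeconds (results.map (fun result => result.map (fun row => row)))) (fun t => t.1)) := by
    show (match PySem.List.min?
        (((((PySem.List.enumerate (results.map (fun result => result.map (fun row => row))) 0).foldl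
            (fun d p => d.modify p.2 [] (fun ps => ps ++ [p.1]))
            (PySem.Dict.empty : PySem.Dict (List (List Int)) (List Int))).items.filter
            (fun p => decide (1 < p.2.length))).map
          (fun p => (PySem.List.pyGetD p.2 1 0, p.1)))) (fun t => t.1) with
      | none => (false, none, none)
      | some (j, r) => (true, some r, some (j + 1))) = _
    rw [pvSeconds_port]
    rcases PySem.List.min?
        (pvSeconds (results.map (fun result => result.map (fun row => row)))) (fun t => t.1) with _ | ⟨j, r⟩ <;> rfl
  rw [hA, hB, pvMin_seconds_eq_fd]
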